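-- pv_equiv track=rewrite | github.com/stephen1776/Algorithmic-Heights | ALG05_Double-DegreeArray/ALG05_Double-DegreeArray.py | ddeg_array
-- ===== SOURCE A (Python) =====
-- def ddeg_array(num_vertices, edges):
--     # adjacency dictionary with vertices as keys,
--     # lists of adjacent vertices as values
--     adj = {k:[] for k in range(1,num_vertices + 1)}
--     for v1, v2 in edges:
--        adj[v1].append(v2)
--        adj[v2].append(v1)
--
--     # degree of a vertex is the number of edges that connect to it
--     # double degree of a vertex is the number of edges that are connected to adjacent vertices
--
--     ddeg = {k:0 for k in adj.keys()}
--     ans = []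
--     for vert in adj:
--         for n in adj[vert]:
--             ddeg[vert] += len(adj[n])
--
--     for k, v in sorted(ddeg.items()):
--         ans.append(v)
--     return ans
-- ===== SOURCE B (Python) =====
-- def ddeg_array(num_vertices, edges):
--     # degree of each vertex, counted straight off the edge list
--     deg = {k: 0 for k in range(1, num_vertices + 1)}
--     for v1, v2 in edges:
--         deg[v1] += 1
--         deg[v2] += 1
--     # double degree: each edge (v1,v2) contributes deg[v2] to v1 and deg[v1] to v2
--     ddeg = {k: 0 for k in range(1, num_vertices + 1)}
--     for v1, v2 in edges:
--         ddeg[v1] += deg[v2]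
--         ddeg[v2] += deg[v1]
--     return [ddeg[k] for k in range(1, num_vertices + 1)]
-- ===== Notes on version B (the rewrite author's own statement) =====
-- stated objective: alternative
-- what changed: B never builds adjacency lists: it counts plain degrees in one pass over the edges, then accumulates ddeg[v1]+=deg[v2], ddeg[v2]+=deg[v1] in a second pass over the edges, and emits values for keys 1..n directly instead of sorting dict items.
import Mathlib
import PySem

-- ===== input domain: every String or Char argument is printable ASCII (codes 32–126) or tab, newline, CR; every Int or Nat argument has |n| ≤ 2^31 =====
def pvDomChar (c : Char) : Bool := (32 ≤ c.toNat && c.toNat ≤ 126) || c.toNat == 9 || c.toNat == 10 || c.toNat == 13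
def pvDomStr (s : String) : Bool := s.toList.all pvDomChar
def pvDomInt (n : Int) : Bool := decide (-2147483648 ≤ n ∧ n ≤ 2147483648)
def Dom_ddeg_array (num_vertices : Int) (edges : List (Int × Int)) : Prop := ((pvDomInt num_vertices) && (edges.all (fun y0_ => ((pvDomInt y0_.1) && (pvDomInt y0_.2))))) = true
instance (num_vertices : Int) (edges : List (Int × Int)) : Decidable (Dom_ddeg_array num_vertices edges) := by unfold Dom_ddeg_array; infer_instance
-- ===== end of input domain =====

-- B replaces A's adjacency-list construction by two plain passes over the edge list
-- (a degree dict, then ddeg[v1]+=deg[v2] / ddeg[v2]+=deg[v1]) and emits keys 1..n directly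
-- instead of sorting dict items (objective: alternative decomposition, less space).

-- ===== PORT A =====
def ddeg_array (num_vertices : Int) (edges : List (Int × Int)) : List Int :=
  let adj0 : PySem.Dict Int (List Int) :=
    (PySem.List.pyRange 1 (num_vertices + 1) 1).foldl (fun d k => d.insert k []) PySem.Dict.empty
  let adj : PySem.Dict Int (List Int) :=
    edges.foldl (fun d e => (d.modify e.1 [] (fun l => l ++ [e.2])).modify e.2 [] (fun l => l ++ [e.1])) adj0
  let ddeg0 : PySem.Dict Int Int :=
    adj.keys.foldl (fun d k => d.insert k 0) PySem.Dict.empty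
  let ddeg : PySem.Dict Int Int :=
    adj.keys.foldl (fun dd vert =>
      (adj.getD vert []).foldl (fun dd2 nb => dd2.modify vert 0 (fun x => x + ((adj.getD nb []).length : Int))) dd) ddeg0
  (PySem.List.sorted2 ddeg.items (fun p => p.1) (fun p => p.2)).foldl (fun a kv => a ++ [kv.2]) []

-- ===== PORT B =====
def ddeg_array_alt (num_vertices : Int) (edges : List (Int × Int)) : List Int :=
  let deg0 : PySem.Dict Int Int :=
    (PySem.List.pyRange 1 (num_vertices + 1) 1).foldl (fun d k => d.insert k 0) PySem.Dict.empty
  let deg : PySem.Dict Int Int :=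
    edges.foldl (fun d e => (d.modify e.1 0 (fun x => x + 1)).modify e.2 0 (fun x => x + 1)) deg0
  let ddeg0 : PySem.Dict Int Int :=
    (PySem.List.pyRange 1 (num_vertices + 1) 1).foldl (fun d k => d.insert k 0) PySem.Dict.empty
  let ddeg : PySem.Dict Int Int :=
    edges.foldl (fun d e => (d.modify e.1 0 (fun x => x + deg.getD e.2 0)).modify e.2 0 (fun x => x + deg.getD e.1 0)) ddeg0
  (PySem.List.pyRange 1 (num_vertices + 1) 1).map (fun k => ddeg.getD k 0)

-- ===== PRECONDITION & SPEC =====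
-- Pre_ excludes exactly the inputs where an edge endpoint is outside 1..num_vertices:
-- there Python A (and Python B) raise KeyError.
def Pre_ddeg_array (num_vertices : Int) (edges : List (Int × Int)) : Prop :=
  ∀ e ∈ edges, 1 ≤ e.1 ∧ e.1 ≤ num_vertices ∧ 1 ≤ e.2 ∧ e.2 ≤ num_vertices
instance (num_vertices : Int) (edges : List (Int × Int)) : Decidable (Pre_ddeg_array num_vertices edges) := by unfold Pre_ddeg_array; infer_instance
def pvWitness_ddeg_array : Int × (List (Int × Int)) := (3, [(1, 2), (2, 3), (3, 3)])

def Spec_ddeg_array (num_vertices : Int) (edges : List (Int × Int)) (out : List Int) : Prop := out = ddeg_array_alt num_vertices edges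
instance (num_vertices : Int) (edges : List (Int × Int)) (out : List Int) : Decidable (Spec_ddeg_array num_vertices edges out) := by unfold Spec_ddeg_array; infer_instance

-- ===== CLAIM (what is proved, stated in full; the proofs are below) =====
def Claim_equal_ddeg_array : Prop := ∀ (num_vertices : Int) (edges : List (Int × Int)), Dom_ddeg_array num_vertices edges → Pre_ddeg_array num_vertices edges → Spec_ddeg_array num_vertices edges (ddeg_array num_vertices edges)

-- ===== LEMMAS AND PROOFS =====

-- neighbour list of v, as A's adjacency build produces it
def adjL (v : Int) (edges : List (Int × Int)) : List Int :=
  edges.flatMap (fun e => (if e.1 = v then [e.2] else []) ++ (if e.2 = v then [e.1] else []))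

-- degree of v
def degV (v : Int) (edges : List (Int × Int)) : Int :=
  (edges.map (fun e => (if e.1 = v then (1 : Int) else 0) + (if e.2 = v then (1 : Int) else 0))).sum

-- double degree of v, given a degree function
def ddegV (deg : Int → Int) (v : Int) (edges : List (Int × Int)) : Int :=
  (edges.map (fun e => (if e.1 = v then deg e.2 else 0) + (if e.2 = v then deg e.1 else 0))).sum

theorem getD_foldl_insert_const {ν : Type} (c : ν) (l : List Int) (d : PySem.Dict Int ν)
    (h : ∀ k, d.getD k c = c) (v : Int) :
    (l.foldl (fun d k => d.insert k c) d).getD v c = c := by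
  induction l generalizing d with
  | nil => exact h v
  | cons x xs ih =>
      simp only [List.foldl_cons]
      refine ih _ (fun k => ?_)
      rw [PySem.Dict.getD_insert]
      split
      · rfl
      · exact h k

theorem keys_modify_of_mem {ν : Type} (d : PySem.Dict Int ν) (k : Int) (d0 : ν) (f : ν → ν)
    (h : k ∈ d.keys) : (d.modify k d0 f).keys = d.keys := by
  rw [PySem.Dict.keys_modify, PySem.Dict.keys_insert_of_contains]
  rwa [PySem.Dict.contains_iff_mem_keys]

theorem adjL_cons (v : Int) (e : Int × Int) (es : List (Int × Int)) :
    adjL v (e :: es)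
      = ((if e.1 = v then [e.2] else []) ++ (if e.2 = v then [e.1] else [])) ++ adjL v es := by
  simp [adjL]

theorem degV_cons (v : Int) (e : Int × Int) (es : List (Int × Int)) :
    degV v (e :: es) = ((if e.1 = v then (1 : Int) else 0) + (if e.2 = v then (1 : Int) else 0)) + degV v es := by
  simp [degV]

theorem ddegV_cons (g : Int → Int) (v : Int) (e : Int × Int) (es : List (Int × Int)) :
    ddegV g v (e :: es) = ((if e.1 = v then g e.2 else 0) + (if e.2 = v then g e.1 else 0)) + ddegV g v es := by
  simp [ddegV]

theorem adj_getD (edges : List (Int × Int)) (d : PySem.Dict Int (List Int)) (v : Int) :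
    (edges.foldl (fun d e => (d.modify e.1 [] (fun l => l ++ [e.2])).modify e.2 [] (fun l => l ++ [e.1])) d).getD v []
      = d.getD v [] ++ adjL v edges := by
  induction edges generalizing d with
  | nil => simp [adjL]
  | cons e es ih =>
      rcases e with ⟨a, b⟩
      simp only [List.foldl_cons]
      rw [ih, adjL_cons]
      simp only [PySem.Dict.getD_modify]
      split_ifs <;> subst_vars <;> simp_all

theorem adj_keys (edges : List (Int × Int)) (d : PySem.Dict Int (List Int))
    (h : ∀ e ∈ edges, e.1 ∈ d.keys ∧ e.2 ∈ d.keys) :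
    (edges.foldl (fun d e => (d.modify e.1 [] (fun l => l ++ [e.2])).modify e.2 [] (fun l => l ++ [e.1])) d).keys
      = d.keys := by
  induction edges generalizing d with
  | nil => rfl
  | cons e es ih =>
      simp only [List.foldl_cons]
      have he := h e (by simp)
      have k1 : (d.modify e.1 [] (fun l => l ++ [e.2])).keys = d.keys :=
        keys_modify_of_mem _ _ _ _ he.1
      have k2 : ((d.modify e.1 [] (fun l => l ++ [e.2])).modify e.2 [] (fun l => l ++ [e.1])).keys = d.keys := by
        rw [keys_modify_of_mem, k1]
        rw [k1]; exact he.2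
      rw [ih _ (fun e' he' => by rw [k2]; exact h e' (by simp [he'])), k2]

theorem deg_getD (edges : List (Int × Int)) (d : PySem.Dict Int Int) (v : Int) :
    (edges.foldl (fun d e => (d.modify e.1 0 (fun x => x + 1)).modify e.2 0 (fun x => x + 1)) d).getD v 0
      = d.getD v 0 + degV v edges := by
  induction edges generalizing d with
  | nil => simp [degV]
  | cons e es ih =>
      rcases e with ⟨a, b⟩
      simp only [List.foldl_cons]
      rw [ih, degV_cons]
      simp only [PySem.Dict.getD_modify]
      split_ifs <;> subst_vars <;> simp_all <;> omega

theorem ddB_getD (edges : List (Int × Int)) (D : PySem.Dict Int Int) (d : PySem.Dict Int Int) (v : Int) :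
    (edges.foldl (fun d e => (d.modify e.1 0 (fun x => x + D.getD e.2 0)).modify e.2 0 (fun x => x + D.getD e.1 0)) d).getD v 0
      = d.getD v 0 + ddegV (fun u => D.getD u 0) v edges := by
  induction edges generalizing d with
  | nil => simp [ddegV]
  | cons e es ih =>
      rcases e with ⟨a, b⟩
      simp only [List.foldl_cons]
      rw [ih, ddegV_cons]
      simp only [PySem.Dict.getD_modify]
      split_ifs <;> subst_vars <;> simp_all <;> omega

theorem innerA_getD (nbs : List Int) (vert : Int) (g : Int → Int) (dd : PySem.Dict Int Int) (x : Int) :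
    (nbs.foldl (fun dd2 nb => dd2.modify vert 0 (fun t => t + g nb)) dd).getD x 0
      = if x = vert then dd.getD x 0 + (nbs.map g).sum else dd.getD x 0 := by
  induction nbs generalizing dd with
  | nil => simp
  | cons n ns ih =>
      simp only [List.foldl_cons]
      rw [ih]
      simp only [PySem.Dict.getD_modify, List.map_cons, List.sum_cons]
      split_ifs <;> subst_vars <;> (simp_all; try omega)

theorem innerA_keys (nbs : List Int) (vert : Int) (g : Int → Int) (dd : PySem.Dict Int Int)
    (h : vert ∈ dd.keys) :
    (nbs.foldl (fun dd2 nb => dd2.modify vert 0 (fun t => t + g nb)) dd).keys = dd.keys := by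
  induction nbs generalizing dd with
  | nil => rfl
  | cons n ns ih =>
      simp only [List.foldl_cons]
      have k1 : (dd.modify vert 0 (fun t => t + g n)).keys = dd.keys := keys_modify_of_mem _ _ _ _ h
      rw [ih _ (by rw [k1]; exact h), k1]

theorem outerA_getD (vs : List Int) (F : Int → List Int) (g : Int → Int) (dd : PySem.Dict Int Int)
    (k : Int) (hnd : vs.Nodup) :
    (vs.foldl (fun dd vert => (F vert).foldl (fun dd2 nb => dd2.modify vert 0 (fun t => t + g nb)) dd) dd).getD k 0
      = dd.getD k 0 + (if k ∈ vs then ((F k).map g).sum else 0) := by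
  induction vs generalizing dd with
  | nil => simp
  | cons v vs ih =>
      simp only [List.foldl_cons]
      rw [ih _ hnd.of_cons, innerA_getD]
      by_cases hk : k = v
      · subst hk
        have : k ∉ vs := by simpa using (List.nodup_cons.mp hnd).1
        simp [this]
      · simp [hk]

theorem outerA_keys (vs : List Int) (F : Int → List Int) (g : Int → Int) (dd : PySem.Dict Int Int)
    (h : ∀ v ∈ vs, v ∈ dd.keys) :
    (vs.foldl (fun dd vert => (F vert).foldl (fun dd2 nb => dd2.modify vert 0 (fun t => t + g nb)) dd) dd).keys
      = dd.keys := by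
  induction vs generalizing dd with
  | nil => rfl
  | cons v vs ih =>
      simp only [List.foldl_cons]
      have k1 := innerA_keys (F v) v g dd (h v (by simp))
      rw [ih _ (fun v' hv' => by rw [k1]; exact h v' (by simp [hv'])), k1]

-- sorted() of a list of pairs whose first components strictly increase is the list itself
theorem sorted2_eq_self_of_fst_lt (l : List (Int × Int))
    (h : l.Pairwise (fun a b => a.1 < b.1)) :
    PySem.List.sorted2 l (fun p => p.1) (fun p => p.2) = l := by
  induction l using List.reverseRecOn with
  | nil => rfl
  | append_singleton l' y ih =>
      have hp := (List.pairwise_append.mp h)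
      unfold PySem.List.sorted2 at *
      simp only [List.foldl_append, List.foldl_cons, List.foldl_nil]
      rw [ih hp.1]
      apply PySem.List.insertBy_of_forall_not_before
      intro e he
      have : e.1 < y.1 := hp.2.2 e he y (by simp)
      simp only [if_neg Bool.false_ne_true, Bool.or_eq_false_iff, Bool.and_eq_false_iff,
        decide_eq_false_iff_not, not_lt]
      constructor
      · omega
      · left; simp; omega

theorem len_adjL (v : Int) (edges : List (Int × Int)) :
    ((adjL v edges).length : Int) = degV v edges := by
  induction edges with
  | nil => simp [adjL, degV]
  | cons e es ih =>
      rw [adjL_cons, degV_cons]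
      simp only [List.length_append, Nat.cast_add]
      rw [ih]
      split_ifs <;> (simp; try omega)

theorem sum_adjL (g : Int → Int) (v : Int) (edges : List (Int × Int)) :
    ((adjL v edges).map g).sum = ddegV g v edges := by
  induction edges with
  | nil => simp [adjL, ddegV]
  | cons e es ih =>
      rw [adjL_cons, ddegV_cons]
      simp only [List.map_append, List.sum_append]
      rw [ih]
      split_ifs <;> (simp; try ring)

theorem ddeg_array_spec_aux (num_vertices : Int) (edges : List (Int × Int))
    (hpre : Pre_ddeg_array num_vertices edges) :
    ddeg_array num_vertices edges = ddeg_array_alt num_vertices edges := by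
  simp only [ddeg_array, ddeg_array_alt]
  set rng := PySem.List.pyRange 1 (num_vertices + 1) 1 with hrng
  set adj0 : PySem.Dict Int (List Int) := rng.foldl (fun d k => d.insert k []) PySem.Dict.empty with hadj0
  set adj : PySem.Dict Int (List Int) :=
    edges.foldl (fun d e => (d.modify e.1 [] (fun l => l ++ [e.2])).modify e.2 [] (fun l => l ++ [e.1])) adj0 with hadj
  have hrngnd : rng.Nodup := hrng ▸ PySem.List.nodup_pyRange_one 1 (num_vertices + 1)
  have hadj0keys : adj0.keys = rng := by
    rw [hadj0, PySem.Dict.keys_foldl_insert (f := fun _ _ => ([] : List Int)), PySem.Dict.keys_empty,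
      PySem.Set.update_nil_left, PySem.Set.ofList_eq_self_of_nodup _ hrngnd]
  have hmem : ∀ e ∈ edges, e.1 ∈ adj0.keys ∧ e.2 ∈ adj0.keys := by
    intro e he
    have := hpre e he
    rw [hadj0keys, hrng]
    constructor <;> rw [PySem.List.mem_pyRange_one] <;> omega
  have hadjkeys : adj.keys = rng := by rw [hadj, adj_keys _ _ hmem, hadj0keys]
  have hadjnd : adj.keys.Nodup := by rw [hadjkeys]; exact hrngnd
  have hadj0getD : ∀ v, adj0.getD v [] = [] := by
    intro v
    rw [hadj0]
    exact getD_foldl_insert_const [] rng PySem.Dict.empty (fun k => PySem.Dict.getD_empty k []) v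
  have hadjgetD : ∀ v, adj.getD v [] = adjL v edges := by
    intro v; rw [hadj, adj_getD, hadj0getD]; simp
  -- A side
  set ddeg0 : PySem.Dict Int Int := adj.keys.foldl (fun d k => d.insert k 0) PySem.Dict.empty with hdd0
  have hdd0getD : ∀ v, ddeg0.getD v 0 = 0 := by
    intro v
    exact getD_foldl_insert_const 0 adj.keys PySem.Dict.empty (fun k => PySem.Dict.getD_empty k 0) v
  have hdd0keys : ddeg0.keys = rng := by
    rw [hdd0, PySem.Dict.keys_foldl_insert (f := fun _ _ => (0 : Int)), PySem.Dict.keys_empty,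
      PySem.Set.update_nil_left, hadjkeys, PySem.Set.ofList_eq_self_of_nodup _ hrngnd]
  set ddegA : PySem.Dict Int Int :=
    adj.keys.foldl (fun dd vert =>
      (adj.getD vert []).foldl (fun dd2 nb => dd2.modify vert 0 (fun x => x + ((adj.getD nb []).length : Int))) dd) ddeg0 with hddA
  have hddAgetD : ∀ k ∈ rng, ddegA.getD k 0 = ((adjL k edges).map (fun nb => ((adjL nb edges).length : Int))).sum := by
    intro k hk
    rw [hddA, outerA_getD adj.keys (fun vert => adj.getD vert []) (fun nb => ((adj.getD nb []).length : Int)) ddeg0 k hadjnd]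
    rw [hdd0getD, hadjkeys, if_pos hk, hadjgetD, zero_add]
    simp only [hadjgetD]
  have hddAkeys : ddegA.keys = rng := by
    rw [hddA, outerA_keys adj.keys (fun vert => adj.getD vert []) (fun nb => ((adj.getD nb []).length : Int)) ddeg0
      (fun v hv => by rw [hdd0keys]; rwa [hadjkeys] at hv), hdd0keys]
  -- A's items, sorted, values
  have hitems : ddegA.items = rng.map (fun k => (k, ddegA.getD k 0)) := by
    rw [PySem.Dict.items_eq_map_keys _ (hddAkeys ▸ hrngnd) 0, hddAkeys]
  have hpair : (rng.map (fun k => (k, ddegA.getD k 0))).Pairwise (fun a b => a.1 < b.1) := by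
    refine List.Pairwise.map _ ?_ (hrng ▸ PySem.List.pairwise_lt_pyRange_one 1 (num_vertices + 1))
    intro a b hab; simpa using hab
  rw [hitems, sorted2_eq_self_of_fst_lt _ hpair,
    PySem.List.foldl_append_singleton_eq_map (f := fun kv : Int × Int => kv.2), List.nil_append, List.map_map]
  -- B side
  set deg0 : PySem.Dict Int Int := rng.foldl (fun d k => d.insert k 0) PySem.Dict.empty with hdeg0
  have hdeg0getD : ∀ v, deg0.getD v 0 = 0 :=
    fun v => getD_foldl_insert_const 0 rng PySem.Dict.empty (fun k => PySem.Dict.getD_empty k 0) v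
  set deg : PySem.Dict Int Int :=
    edges.foldl (fun d e => (d.modify e.1 0 (fun x => x + 1)).modify e.2 0 (fun x => x + 1)) deg0 with hdeg
  have hdeggetD : ∀ v, deg.getD v 0 = degV v edges := by
    intro v; rw [hdeg, deg_getD, hdeg0getD, zero_add]
  set ddB : PySem.Dict Int Int :=
    edges.foldl (fun d e => (d.modify e.1 0 (fun x => x + deg.getD e.2 0)).modify e.2 0 (fun x => x + deg.getD e.1 0)) deg0 with hddB
  have hddBgetD : ∀ v, ddB.getD v 0 = ddegV (fun u => deg.getD u 0) v edges := by
    intro v; rw [hddB, ddB_getD, hdeg0getD, zero_add]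
  -- both sides are maps over rng; compare pointwise
  apply List.map_congr_left
  intro k hk
  simp only [Function.comp]
  rw [hddAgetD k hk, hddBgetD]
  have h1 : (fun nb => ((adjL nb edges).length : Int)) = fun nb => degV nb edges :=
    funext fun nb => len_adjL nb edges
  have h2 : (fun u => deg.getD u 0) = fun u => degV u edges :=
    funext fun u => hdeggetD u
  rw [h1, h2, sum_adjL]

-- ===== VERDICT (by name: the statement is the Claim_ definition above) =====
theorem ddeg_array_spec : Claim_equal_ddeg_array := by
  intro num_vertices edges _ hpre
  unfold Spec_ddeg_array
  exact ddeg_array_spec_aux num_vertices edges hpre
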